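-- pv_equiv track=rewrite | github.com/philipritchey/l-star | main.py | inflate
-- ===== SOURCE A (Python) =====
-- def inflate(example: str, alphabet: str) -> list[str]:
--   '''
--   replace each X with a in alphabet
--
--   Args:
--     example (set[str]): example to inflate
--     alphabet (str): alphabet to use
--
--   Returns:
--     list[str]: inflated examples
--   '''
--   if 'X' not in example:
--     return [example]
--   inflated_examples = []
--   for a in alphabet:
--     es = inflate(example.replace('X', a, 1), alphabet)
--     inflated_examples.extend(es)
--   return inflated_examples
-- ===== SOURCE B (Python) =====
-- def inflate(example: str, alphabet: str) -> list[str]: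
--   k = example.count('X')
--   combos = ['']
--   for _ in range(k):
--     combos = [a + c for a in alphabet for c in combos]
--   out = []
--   for combo in combos:
--     s = example
--     for sym in combo:
--       s = s.replace('X', sym, 1)
--     out.append(s)
--   return out
-- ===== Notes on version B (the rewrite author's own statement) =====
-- stated objective: idiomatic
-- what changed: Replaced A's recursion on the first 'X' by an iterative build: first construct all k-symbol combinations (k = number of 'X') with a repeated list comprehension, then fill each combination into the example left-to-right in one pass.
import Mathlib
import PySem

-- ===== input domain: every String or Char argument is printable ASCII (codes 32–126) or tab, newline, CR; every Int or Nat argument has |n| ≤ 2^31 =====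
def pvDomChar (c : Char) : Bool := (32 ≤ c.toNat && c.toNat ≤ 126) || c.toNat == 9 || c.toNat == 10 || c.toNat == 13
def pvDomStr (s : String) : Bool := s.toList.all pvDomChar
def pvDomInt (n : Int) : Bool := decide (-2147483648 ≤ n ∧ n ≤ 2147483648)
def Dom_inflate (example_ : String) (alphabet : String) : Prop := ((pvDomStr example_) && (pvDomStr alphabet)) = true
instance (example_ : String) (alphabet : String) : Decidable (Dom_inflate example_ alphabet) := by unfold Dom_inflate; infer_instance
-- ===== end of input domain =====

-- B replaces A's recursion by an iterative build of all k-symbol combinations followed by one fill pass per combination (objective: idiomatic/alternative decomposition, same cost).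

-- s.replace('X', a, 1): replace the leftmost 'X' (exact hand port; PySem.Str.replace has no count parameter)
def replaceFirstX : List Char → Char → List Char
  | [], _ => []
  | c :: cs, a => if c = 'X' then a :: cs else c :: replaceFirstX cs a

-- ===== PORT A =====
-- fuel is a totality guard only: each recursive call removes one 'X' when 'X' ∉ alphabet
-- (inside Pre_), so fuel = count + 1 is never exhausted there.  `'X' in example` (a
-- single-character needle) is ported exactly as list membership of 'X'.
def inflateCoreA : Nat → List Char → List Char → List (List Char)
  | 0, _, _ => []
  | fuel + 1, s, alph =>
    if s.contains 'X' = false then [s]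
    else alph.flatMap (fun a => inflateCoreA fuel (replaceFirstX s a) alph)

def inflate (example_ : String) (alphabet : String) : List String :=
  (inflateCoreA (example_.toList.count 'X' + 1) example_.toList alphabet.toList).map
    (fun cs => String.ofList cs)

-- ===== PORT B =====
-- fill: for sym in combo: s = s.replace('X', sym, 1)
def fillX (s : List Char) (combo : List Char) : List Char := combo.foldl replaceFirstX s

-- example.count('X') (single-character needle) ported exactly as list count of 'X'
def inflate_alt (example_ : String) (alphabet : String) : List String :=
  let k := example_.toList.count 'X'
  let combos := (List.range k).foldl
    (fun cs _ => alphabet.toList.flatMap (fun a => cs.map (fun c => a :: c)))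
    [([] : List Char)]
  combos.map (fun combo => String.ofList (fillX example_.toList combo))

-- ===== PRECONDITION & SPEC =====
-- Pre_ excludes exactly the inputs where Python A raises RecursionError: when the example
-- contains 'X' and the alphabet also contains 'X', the replacement never removes an 'X'
-- and A recurses forever.
def Pre_inflate (example_ : String) (alphabet : String) : Prop :=
  ¬ ('X' ∈ example_.toList ∧ 'X' ∈ alphabet.toList)
instance (example_ : String) (alphabet : String) : Decidable (Pre_inflate example_ alphabet) := by unfold Pre_inflate; infer_instance
def pvWitness_inflate : String × String := ("aXbX", "01")

def Spec_inflate (example_ : String) (alphabet : String) (out : List String) : Prop := out = inflate_alt example_ alphabet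
instance (example_ : String) (alphabet : String) (out : List String) : Decidable (Spec_inflate example_ alphabet out) := by unfold Spec_inflate; infer_instance

-- ===== CLAIM (what is proved, stated in full; the proofs are below) =====
def Claim_equal_inflate : Prop := ∀ (example_ : String) (alphabet : String), Dom_inflate example_ alphabet → Pre_inflate example_ alphabet → Spec_inflate example_ alphabet (inflate example_ alphabet)

-- ===== LEMMAS AND PROOFS =====

-- the set of k-symbol combinations, leftmost symbol varying slowest
def tuples (alph : List Char) : Nat → List (List Char)
  | 0 => [[]]
  | k + 1 => alph.flatMap (fun a => (tuples alph k).map (fun t => a :: t))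

theorem combos_eq (alph : List Char) (k : Nat) :
    (List.range k).foldl
      (fun cs _ => alph.flatMap (fun a => cs.map (fun c => a :: c)))
      [([] : List Char)] = tuples alph k := by
  induction k with
  | zero => rfl
  | succ k ih => rw [List.range_succ, List.foldl_append, ih]; rfl

theorem count_replaceFirstX (s : List Char) (a : Char) (hs : 'X' ∈ s) (ha : a ≠ 'X') :
    (replaceFirstX s a).count 'X' + 1 = s.count 'X' := by
  induction s with
  | nil => cases hs
  | cons c cs ih =>
    by_cases hc : c = 'X'
    · subst hc
      simp [replaceFirstX, ha]
    · have hs' : 'X' ∈ cs := by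
        rcases List.mem_cons.1 hs with h | h
        · exact absurd h.symm hc
        · exact h
      simp only [replaceFirstX, if_neg hc, List.count_cons]
      rw [← ih hs']
      omega

theorem flatMap_congr_mem {α β : Type} (l : List α) (f g : α → List β)
    (h : ∀ a ∈ l, f a = g a) : l.flatMap f = l.flatMap g := by
  induction l with
  | nil => rfl
  | cons x t ih =>
    simp only [List.flatMap_cons, h x (by simp), ih (fun a ha => h a (List.mem_cons_of_mem _ ha))]

theorem inflateCoreA_eq (alph : List Char) :
    ∀ (k : Nat) (s : List Char), s.count 'X' = k → (k ≠ 0 → 'X' ∉ alph) →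
      inflateCoreA (k + 1) s alph = (tuples alph k).map (fillX s) := by
  intro k
  induction k with
  | zero =>
    intro s hc _
    have hx : s.contains 'X' = false := by
      simp only [List.contains_eq_mem, decide_eq_false_iff_not]
      exact (List.count_eq_zero.1 hc)
    show (if s.contains 'X' = false then [s]
          else alph.flatMap (fun a => inflateCoreA 0 (replaceFirstX s a) alph))
        = (tuples alph 0).map (fillX s)
    rw [hx]
    simp [tuples, fillX]
  | succ k ih =>
    intro s hc halph
    have halph' : 'X' ∉ alph := halph (by omega)
    have hx : 'X' ∈ s := by
      by_contra h
      rw [List.count_eq_zero.2 h] at hc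
      omega
    have hxc : s.contains 'X' = true := by
      simp only [List.contains_eq_mem, decide_eq_true_eq]; exact hx
    show (if s.contains 'X' = false then [s]
          else alph.flatMap (fun a => inflateCoreA (k + 1) (replaceFirstX s a) alph))
        = (tuples alph (k + 1)).map (fillX s)
    rw [hxc]
    simp only [Bool.true_eq_false, if_false, tuples, List.map_flatMap, List.map_map]
    apply flatMap_congr_mem
    intro a ha
    have ha' : a ≠ 'X' := fun h => halph' (h ▸ ha)
    have : (replaceFirstX s a).count 'X' = k := by
      have := count_replaceFirstX s a hx ha'
      omega
    rw [ih (replaceFirstX s a) this (fun _ => halph')]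
    rfl

-- ===== VERDICT (by name: the statement is the Claim_ definition above) =====
theorem inflate_spec : Claim_equal_inflate := by
  intro example_ alphabet _ hpre
  have hk : (example_.toList.count 'X' ≠ 0 → 'X' ∉ alphabet.toList) := fun hne hal =>
    hpre ⟨List.count_pos_iff.1 (Nat.pos_of_ne_zero hne), hal⟩
  show inflate example_ alphabet = inflate_alt example_ alphabet
  unfold inflate inflate_alt
  simp only [combos_eq,
    inflateCoreA_eq alphabet.toList (example_.toList.count 'X') example_.toList rfl hk,
    List.map_map]
  rfl
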